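-- pv_equiv track=rewrite | github.com/shaurya2577/protein-modeler | backend/data_collection/protein_collector.py | merge_proteins
-- ===== SOURCE A (Python) =====
-- from typing import List, Dict, Optional
--
-- def merge_proteins(protein_lists: List[List[Dict]]) -> List[Dict]:
--     """Merge multiple protein lists, deduplicating by uniprot_id"""
--
--     protein_map = {}
--
--     for protein_list in protein_lists:
--         for protein in protein_list:
--             uniprot_id = protein.get("uniprot_id")
--             if not uniprot_id:
--                 continue
--
--             if uniprot_id not in protein_map:
--                 protein_map[uniprot_id] = protein
--             else:
--                 # Merge data, keeping most complete information
--                 existing = protein_map[uniprot_id]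
--                 for key, value in protein.items():
--                     if value and not existing.get(key):
--                         existing[key] = value
--
--     return list(protein_map.values())
-- ===== SOURCE B (Python) =====
-- def merge_proteins(protein_lists):
--     """Merge multiple protein lists, deduplicating by uniprot_id.
--
--     Dict-free staged pipeline: flatten to the proteins with a truthy
--     uniprot_id, compute the first-seen order of ids, then build each
--     output dict by folding that id's group into its first member.
--     Like A, fills the first-seen dict in place; return-value equivalent.
--     """
--     proteins = [p for pl in protein_lists for p in pl if p.get("uniprot_id")]
--     order = list(dict.fromkeys(p.get("uniprot_id") for p in proteins))
--     merged = []
--     for uid in order: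
--         group = [p for p in proteins if p.get("uniprot_id") == uid]
--         base = group[0]
--         for other in group[1:]:
--             for key, value in other.items():
--                 if value and not base.get(key):
--                     base[key] = value
--         merged.append(base)
--     return merged
-- ===== Notes on version B (the rewrite author's own statement) =====
-- stated objective: alternative
-- what changed: Replaces A's single incremental dict-accumulating pass by a dict-free staged pipeline: flatten to proteins with a truthy uniprot_id, compute the first-seen id order with dict.fromkeys, then for each id filter out its group and fold it into its first member.
import Mathlib
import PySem

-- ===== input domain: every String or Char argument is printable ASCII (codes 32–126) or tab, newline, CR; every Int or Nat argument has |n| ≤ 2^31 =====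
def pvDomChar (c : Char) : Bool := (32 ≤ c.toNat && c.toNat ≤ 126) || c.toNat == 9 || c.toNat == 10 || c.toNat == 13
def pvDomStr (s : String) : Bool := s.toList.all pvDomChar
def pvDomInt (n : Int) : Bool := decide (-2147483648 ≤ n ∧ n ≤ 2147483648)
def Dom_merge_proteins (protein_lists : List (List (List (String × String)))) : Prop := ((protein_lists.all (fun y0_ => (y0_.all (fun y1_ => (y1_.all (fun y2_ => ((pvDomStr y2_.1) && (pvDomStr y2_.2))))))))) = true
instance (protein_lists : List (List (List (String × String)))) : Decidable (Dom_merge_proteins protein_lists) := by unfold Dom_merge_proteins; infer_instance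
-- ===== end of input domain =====

-- B replaces A's single incremental dict-accumulating pass by a dict-free staged pipeline
-- (flatten, first-seen id order, per-id group fold); return-value equivalence (both Pythons
-- fill the first-seen input dict in place).

-- ===== PORT A =====
-- A's inner merge loop: `for key, value in protein.items(): if value and not existing.get(key): existing[key] = value`
def fillA (existing protein : List (String × String)) : List (String × String) :=
  protein.foldl
    (fun ex kv =>
      if kv.2 ≠ "" ∧ ((PySem.Dict.mk ex).get? kv.1).getD "" = "" then
        ((PySem.Dict.mk ex).insert kv.1 kv.2).items
      else ex)
    existing

-- body of A's loop over one protein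
def stepA (pm : PySem.Dict String (List (String × String))) (protein : List (String × String)) :
    PySem.Dict String (List (String × String)) :=
  let uniprot_id := ((PySem.Dict.mk protein).get? "uniprot_id").getD ""
  if uniprot_id = "" then pm
  else
    match pm.get? uniprot_id with
    | none => pm.insert uniprot_id protein
    | some existing => pm.insert uniprot_id (fillA existing protein)  -- in-place fill keeps position

def merge_proteins (protein_lists : List (List (List (String × String)))) : List (List (String × String)) :=
  (protein_lists.foldl (fun pm protein_list => protein_list.foldl stepA pm) PySem.Dict.empty).values

-- ===== PORT B =====
-- p.get("uniprot_id") with "" standing for Python's falsy missing/empty value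
def uidB (p : List (String × String)) : String :=
  ((PySem.Dict.mk p).get? "uniprot_id").getD ""

-- Source B's inner merge loop, transcribed as structural recursion over other's items
-- (base mutated in place in the Python; here the updated base is threaded through)
def fillB : List (String × String) → List (String × String) → List (String × String)
  | base, [] => base
  | base, (key, value) :: rest =>
      fillB
        (if value ≠ "" ∧ ((PySem.Dict.mk base).get? key).getD "" = "" then
           ((PySem.Dict.mk base).insert key value).items
         else base)
        rest

-- `base = group[0]; for other in group[1:]: …` ([] is unreachable: every group is nonempty)
def mergeGroupB : List (List (String × String)) → List (String × String)
  | [] => []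
  | base :: rest => rest.foldl fillB base

def merge_proteins_alt (protein_lists : List (List (List (String × String)))) : List (List (String × String)) :=
  let proteins := protein_lists.flatMap (fun pl => pl.filter (fun p => uidB p ≠ ""))
  let order := PySem.List.dedup (proteins.map uidB)
  order.map (fun uid => mergeGroupB (proteins.filter (fun p => uidB p == uid)))

-- ===== PRECONDITION & SPEC =====
def Spec_merge_proteins (protein_lists : List (List (List (String × String)))) (out : List (List (String × String))) : Prop := out = merge_proteins_alt protein_lists
instance (protein_lists : List (List (List (String × String)))) (out : List (List (String × String))) : Decidable (Spec_merge_proteins protein_lists out) := by unfold Spec_merge_proteins; infer_instance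

-- ===== CLAIM (what is proved, stated in full; the proofs are below) =====
def Claim_equal_merge_proteins : Prop := ∀ (protein_lists : List (List (List (String × String)))), Dom_merge_proteins protein_lists → Spec_merge_proteins protein_lists (merge_proteins protein_lists)


-- ===== LEMMAS AND PROOFS =====

-- stepA without the falsy-uid skip (fed only already-filtered proteins)
def stepA' (pm : PySem.Dict String (List (String × String))) (p : List (String × String)) :
    PySem.Dict String (List (String × String)) :=
  match pm.get? (uidB p) with
  | none => pm.insert (uidB p) p
  | some existing => pm.insert (uidB p) (fillA existing p)

theorem fillB_eq_fillA (l base : List (String × String)) : fillB base l = fillA base l := by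
  induction l generalizing base with
  | nil => rfl
  | cons kv rest ih =>
    obtain ⟨k, v⟩ := kv
    rw [show fillA base ((k, v) :: rest)
          = fillA (if v ≠ "" ∧ ((PySem.Dict.mk base).get? k).getD "" = "" then
                     ((PySem.Dict.mk base).insert k v).items
                   else base) rest from rfl]
    rw [fillB, ih]

theorem stepA_eq (pm : PySem.Dict String (List (String × String))) (p : List (String × String)) :
    stepA pm p = if uidB p = "" then pm else stepA' pm p := rfl

theorem foldl_stepA_filter (l : List (List (String × String)))
    (pm : PySem.Dict String (List (String × String))) :
    l.foldl stepA pm = (l.filter (fun p => uidB p ≠ "")).foldl stepA' pm := by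
  induction l generalizing pm with
  | nil => rfl
  | cons p rest ih =>
    by_cases h : uidB p = "" <;>
      simp [h, stepA_eq, ih]

theorem foldl_outer (pls : List (List (List (String × String))))
    (pm : PySem.Dict String (List (String × String))) :
    pls.foldl (fun pm pl => pl.foldl stepA pm) pm
      = (pls.flatMap (fun pl => pl.filter (fun p => uidB p ≠ ""))).foldl stepA' pm := by
  induction pls generalizing pm with
  | nil => rfl
  | cons pl rest ih =>
    simp only [List.foldl_cons, List.flatMap_cons, List.foldl_append]
    rw [foldl_stepA_filter, ih]

-- A's protein_map after processing the (filtered) protein stream ps, written as B computes it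
def fdict (ps : List (List (String × String))) : PySem.Dict String (List (String × String)) :=
  PySem.Dict.mk ((PySem.List.dedup (ps.map uidB)).map
    (fun u => (u, mergeGroupB (ps.filter (fun p => uidB p == u)))))

theorem get?_mk_map {a : Type} (keys : List String) (g : String → a) (x : String) :
    (PySem.Dict.mk (keys.map (fun u => (u, g u)))).get? x
      = if x ∈ keys then some (g x) else none := by
  induction keys with
  | nil => rfl
  | cons k ks ih =>
    simp only [List.map_cons, PySem.Dict.get?_mk_cons, ih, List.mem_cons]
    by_cases h : k = x
    · simp [h]
    · have h2 : ¬ x = k := fun e => h e.symm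
      simp [h, h2]

theorem dedup_append (l : List String) (u : String) :
    PySem.List.dedup (l ++ [u])
      = if u ∈ l then PySem.List.dedup l else PySem.List.dedup l ++ [u] := by
  simp only [PySem.List.dedup_eq_ofList, PySem.Set.ofList_eq_foldl, List.foldl_append,
    List.foldl_cons, List.foldl_nil]
  rw [PySem.Set.add]
  have hm : u ∈ List.foldl PySem.Set.add [] l ↔ u ∈ l := PySem.Set.mem_ofList l u
  by_cases h : u ∈ l
  · simp [hm.2 h, h]
  · simp [hm, h]

theorem mergeGroupB_append (l : List (List (String × String))) (hl : l ≠ [])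
    (p : List (String × String)) :
    mergeGroupB (l ++ [p]) = fillA (mergeGroupB l) p := by
  obtain ⟨b, r, rfl⟩ := List.exists_cons_of_ne_nil hl
  simp [mergeGroupB, List.foldl_append, fillB_eq_fillA]

theorem stepA'_fdict (ps : List (List (String × String))) (p : List (String × String)) :
    stepA' (fdict ps) p = fdict (ps ++ [p]) := by
  have hget : ∀ x, (fdict ps).get? x
      = if x ∈ PySem.List.dedup (ps.map uidB)
        then some (mergeGroupB (ps.filter (fun q => uidB q == x))) else none := by
    intro x; exact get?_mk_map _ _ x
  have hmem : ∀ x, x ∈ PySem.List.dedup (ps.map uidB) ↔ x ∈ ps.map uidB := by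
    intro x; exact PySem.List.mem_dedup (xs := ps.map uidB) (x := x)
  by_cases hu : uidB p ∈ ps.map uidB
  · -- key already present: in-place update of the stored merged dict
    have hgu : (fdict ps).get? (uidB p)
        = some (mergeGroupB (ps.filter (fun q => uidB q == uidB p))) := by
      rw [hget, if_pos ((hmem _).2 hu)]
    have hcont : (fdict ps).contains (uidB p) = true := by
      rw [PySem.Dict.contains_eq_isSome_get?, hgu]; rfl
    have hne : ps.filter (fun q => uidB q == uidB p) ≠ [] := by
      obtain ⟨q, hq, hq2⟩ := List.mem_map.1 hu
      have hqf : q ∈ ps.filter (fun q => uidB q == uidB p) := by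
        rw [List.mem_filter]; exact ⟨hq, by rw [hq2]; simp⟩
      exact fun h0 => by rw [h0] at hqf; cases hqf
    apply PySem.Dict.ext
    rw [show stepA' (fdict ps) p
        = (fdict ps).insert (uidB p) (fillA (mergeGroupB (ps.filter (fun q => uidB q == uidB p))) p) by
      unfold stepA'; rw [hgu]]
    rw [PySem.Dict.items_insert_of_contains _ _ hcont]
    unfold fdict
    rw [show (ps ++ [p]).map uidB = ps.map uidB ++ [uidB p] by simp, dedup_append]
    simp only [hu, if_true, List.map_map]
    apply List.map_congr_left
    intro u' hu'
    by_cases h : u' = uidB p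
    · subst h
      simp only [Function.comp, beq_self_eq_true, if_true]
      rw [show (ps ++ [p]).filter (fun q => uidB q == uidB p)
            = ps.filter (fun q => uidB q == uidB p) ++ [p] by
          simp [List.filter_append]]
      rw [mergeGroupB_append _ hne]
    · have hb : (uidB p == u') = false := by simp [Ne.symm h]
      have hb2 : (u' == uidB p) = false := by simp [h]
      simp [Function.comp, hb2, List.filter_append, hb]
  · -- fresh key: append
    have hgu : (fdict ps).get? (uidB p) = none := by
      rw [hget, if_neg (fun h => hu ((hmem _).1 h))]
    have hcont : (fdict ps).contains (uidB p) = false := by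
      rw [PySem.Dict.contains_eq_isSome_get?, hgu]; rfl
    apply PySem.Dict.ext
    rw [show stepA' (fdict ps) p = (fdict ps).insert (uidB p) p by unfold stepA'; rw [hgu]]
    rw [PySem.Dict.items_insert_of_not_contains _ _ hcont]
    unfold fdict
    rw [show (ps ++ [p]).map uidB = ps.map uidB ++ [uidB p] by simp, dedup_append]
    simp only [hu, if_false, List.map_append]
    congr 1
    · apply List.map_congr_left
      intro u' hu'
      have hu'mem : u' ∈ ps.map uidB := (hmem _).1 hu'
      have h : ¬ uidB p = u' := fun e => hu (e ▸ hu'mem)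
      have hb : (uidB p == u') = false := by simp [h]
      simp [List.filter_append, hb]
    · have hnil : ps.filter (fun q => uidB q == uidB p) = [] := by
        rw [List.filter_eq_nil_iff]
        intro q hq
        simp only [beq_iff_eq]
        exact fun e => hu (List.mem_map.2 ⟨q, hq, e⟩)
      simp [List.filter_append, hnil, mergeGroupB]

theorem foldl_stepA'_fdict (ps : List (List (String × String))) :
    ps.foldl stepA' PySem.Dict.empty = fdict ps := by
  induction ps using List.reverseRecOn with
  | nil => rfl
  | append_singleton ps p ih =>
    rw [List.foldl_append, List.foldl_cons, List.foldl_nil, ih, stepA'_fdict]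

-- ===== VERDICT (by name: the statement is the Claim_ definition above) =====
theorem merge_proteins_spec : Claim_equal_merge_proteins := by
  intro pls _
  unfold Spec_merge_proteins merge_proteins merge_proteins_alt
  rw [foldl_outer, foldl_stepA'_fdict]
  simp [fdict, PySem.Dict.values, List.map_map, Function.comp]
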